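-- pv_equiv track=rewrite | github.com/JakeBaumbaugh/advent-of-code | 2024/21/pt1.py | calc_moves
-- ===== SOURCE A (Python) =====
-- num_keypad = [['7','8','9'], ['4','5','6'], ['1','2','3'], ['','0','A']]
--
-- dir_keypad = [['','^','A'], ['<', 'v', '>']]
--
-- def find_key(keypad, key):
--     for y in range(len(keypad)):
--         for x in range(len(keypad[y])):
--             if keypad[y][x] == key:
--                 return (x, y)
--     return None
--
-- def moves(keypad, start, end):
--     start_point = start
--     end_point = end
--     lr_moves = ''
--     ud_moves = ''
--     if end_point[0] > start_point[0]:
--         lr_moves += '>' * (end_point[0] - start_point[0])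
--     elif end_point[0] < start_point[0]:
--         lr_moves += '<' * (start_point[0] - end_point[0])
--     if end_point[1] > start_point[1]:
--         ud_moves += 'v' * (end_point[1] - start_point[1])
--     elif end_point[1] < start_point[1]:
--         ud_moves += '^' * (start_point[1] - end_point[1])
--     lr_first_valid = valid_moves(keypad, start_point, lr_moves + ud_moves + 'A')
--     ud_first_valid = valid_moves(keypad, start_point, ud_moves + lr_moves + 'A')
--     if '<' in lr_moves and lr_first_valid:
--         return lr_moves + ud_moves + 'A'
--     return ud_moves + lr_moves + 'A' if ud_first_valid else lr_moves + ud_moves + 'A'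
--
-- def valid_moves(keypad, point, moves):
--     point = (point[0], point[1])
--     for move in moves:
--         if move == 'v':
--             point = (point[0], point[1] + 1)
--         elif move == '^':
--             point = (point[0], point[1] - 1)
--         elif move == '<':
--             point = (point[0] - 1, point[1])
--         elif move == '>':
--             point = (point[0] + 1, point[1])
--
--         if keypad[point[1]][point[0]] == '':
--             return False
--     return True
--
-- def calc_moves(string):
--     rob_1 = find_key(dir_keypad, 'A')
--     rob_2 = find_key(dir_keypad, 'A')
--     rob_3 = find_key(num_keypad, 'A')
--     moves_3_str = ''
--     moves_2_str = ''
--     moves_1_str = ''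
--     for char_3 in string:
--         point_3 = find_key(num_keypad, char_3)
--         moves_3 = moves(num_keypad, rob_3, point_3)
--         rob_3 = point_3
--         moves_3_str += moves_3
--         for char_2 in moves_3:
--             point_2 = find_key(dir_keypad, char_2)
--             moves_2 = moves(dir_keypad, rob_2, point_2)
--             rob_2 = point_2
--             moves_2_str += moves_2
--             for char_1 in moves_2:
--                 point_1 = find_key(dir_keypad, char_1)
--                 moves_1 = moves(dir_keypad, rob_1, point_1)
--                 rob_1 = point_1
--                 moves_1_str += moves_1
--     return moves_3_str, moves_2_str, moves_1_str
-- ===== SOURCE B (Python) =====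
-- num_keypad = [['7','8','9'], ['4','5','6'], ['1','2','3'], ['','0','A']]
--
-- dir_keypad = [['','^','A'], ['<', 'v', '>']]
--
-- def path(gap, start, end):
--     sx, sy = start
--     ex, ey = end
--     gx, gy = gap
--     lr = '>' * (ex - sx) if ex >= sx else '<' * (sx - ex)
--     ud = 'v' * (ey - sy) if ey >= sy else '^' * (sy - ey)
--     # horizontal-leg-first path hits the gap iff the gap sits on the horizontal
--     # sweep (row sy, strictly past the start) or on the vertical sweep (column ex)
--     lr_ok = not ((gy == sy and gx != sx and min(sx, ex) <= gx <= max(sx, ex))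
--                  or (gx == ex and min(sy, ey) <= gy <= max(sy, ey)))
--     ud_ok = not ((gx == sx and gy != sy and min(sy, ey) <= gy <= max(sy, ey))
--                  or (gy == ey and min(sx, ex) <= gx <= max(sx, ex)))
--     if '<' in lr and lr_ok:
--         return lr + ud + 'A'
--     return ud + lr + 'A' if ud_ok else lr + ud + 'A'
--
-- def build_table(keypad):
--     cells = [(k, (x, y)) for y, row in enumerate(keypad) for x, k in enumerate(row)]
--     gap = next(p for k, p in cells if k == '')
--     keys = [(k, p) for k, p in cells if k != '']
--     return {(a, b): path(gap, pa, pb) for a, pa in keys for b, pb in keys}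
--
-- def expand(table, seq):
--     return ''.join(table[(a, b)] for a, b in zip('A' + seq, seq))
--
-- def calc_moves(string):
--     num_table = build_table(num_keypad)
--     dir_table = build_table(dir_keypad)
--     moves_3_str = expand(num_table, string)
--     moves_2_str = expand(dir_table, moves_3_str)
--     moves_1_str = expand(dir_table, moves_2_str)
--     return moves_3_str, moves_2_str, moves_1_str
-- ===== Notes on version B (the rewrite author's own statement) =====
-- stated objective: alternative
-- what changed: B precomputes one move-string table per keypad (closed-form gap-avoidance test replaces the step-by-step valid_moves simulation) and expands each of the three layers as a zip of consecutive key pairs looked up in the table, instead of A's interleaved triple-nested loop that recomputes and validates each move string on the fly.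
import Mathlib
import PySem

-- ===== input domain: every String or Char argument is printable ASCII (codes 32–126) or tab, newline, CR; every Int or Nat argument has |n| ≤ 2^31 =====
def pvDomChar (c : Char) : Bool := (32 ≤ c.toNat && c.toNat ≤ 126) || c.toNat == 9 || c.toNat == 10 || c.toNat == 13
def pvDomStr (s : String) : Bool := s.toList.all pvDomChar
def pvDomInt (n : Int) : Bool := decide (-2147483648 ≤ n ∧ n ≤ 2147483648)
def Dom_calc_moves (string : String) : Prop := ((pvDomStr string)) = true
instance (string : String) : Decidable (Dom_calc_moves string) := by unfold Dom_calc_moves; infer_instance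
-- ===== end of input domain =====

-- B precomputes one move table per keypad with a closed-form gap test and expands each layer by
-- table lookups over consecutive key pairs, replacing A's interleaved triple-nested simulation loop.

-- ===== PORT A =====
def numKeypad : List (List String) :=
  [["7","8","9"], ["4","5","6"], ["1","2","3"], ["","0","A"]]

def dirKeypad : List (List String) :=
  [["","^","A"], ["<","v",">"]]

-- find_key's row scan: first x with row[x] == key
def findKeyRow (row : List String) (key : String) (x : Int) : Option Int :=
  match row with
  | [] => none
  | c :: cs => if c == key then some x else findKeyRow cs key (x + 1)

def findKeyAux (kp : List (List String)) (key : String) (y : Int) : Option (Int × Int) :=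
  match kp with
  | [] => none
  | r :: rs =>
    match findKeyRow r key 0 with
    | some x => some (x, y)
    | none => findKeyAux rs key (y + 1)

def findKey (kp : List (List String)) (key : String) : Option (Int × Int) :=
  findKeyAux kp key 0

-- keypad[point[1]][point[0]]; indices reachable under Pre_ stay inside the keypad,
-- so the getD defaults are never the decisive value there
def cellAt (kp : List (List String)) (p : Int × Int) : String :=
  (PySem.List.pyGet? ((PySem.List.pyGet? kp p.2).getD []) p.1).getD ""

def validMoves (kp : List (List String)) (point : Int × Int) : List Char → Bool
  | [] => true
  | m :: rest =>
    let p :=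
      if m = 'v' then (point.1, point.2 + 1)
      else if m = '^' then (point.1, point.2 - 1)
      else if m = '<' then (point.1 - 1, point.2)
      else if m = '>' then (point.1 + 1, point.2)
      else point
    if cellAt kp p == "" then false else validMoves kp p rest

def movesF (kp : List (List String)) (s e : Int × Int) : List Char :=
  let lr : List Char :=
    if e.1 > s.1 then List.replicate (e.1 - s.1).toNat '>'
    else if e.1 < s.1 then List.replicate (s.1 - e.1).toNat '<'
    else []
  let ud : List Char :=
    if e.2 > s.2 then List.replicate (e.2 - s.2).toNat 'v'
    else if e.2 < s.2 then List.replicate (s.2 - e.2).toNat '^'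
    else []
  let lrFirst := validMoves kp s (lr ++ ud ++ ['A'])
  let udFirst := validMoves kp s (ud ++ lr ++ ['A'])
  if lr.contains '<' && lrFirst then lr ++ ud ++ ['A']
  else if udFirst then ud ++ lr ++ ['A']
  else lr ++ ud ++ ['A']

-- find_key for a single character; Python raises (TypeError on None) when the key is absent —
-- those inputs are excluded by Pre_, the (0,0) default is never reached there
def fkP (kp : List (List String)) (c : Char) : Int × Int :=
  (findKey kp (String.singleton c)).getD (0, 0)

-- A's innermost loop (over chars of moves_2), threading (rob_1, moves_1_str)
def loopA1 (r1 : Int × Int) (s1 : List Char) : List Char → (Int × Int) × List Char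
  | [] => (r1, s1)
  | c :: cs =>
    let p := fkP dirKeypad c
    loopA1 p (s1 ++ movesF dirKeypad r1 p) cs

-- A's middle loop (over chars of moves_3), threading (rob_2, rob_1, moves_2_str, moves_1_str)
def loopA2 (r2 r1 : Int × Int) (s2 s1 : List Char) :
    List Char → (Int × Int) × (Int × Int) × List Char × List Char
  | [] => (r2, r1, s2, s1)
  | c :: cs =>
    let p2 := fkP dirKeypad c
    let m2 := movesF dirKeypad r2 p2
    let z := loopA1 r1 s1 m2
    loopA2 p2 z.1 (s2 ++ m2) z.2 cs

-- A's outer loop (over chars of string), threading all six state variables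
def loopA3 (r3 r2 r1 : Int × Int) (s3 s2 s1 : List Char) :
    List Char → (Int × Int) × (Int × Int) × (Int × Int) × List Char × List Char × List Char
  | [] => (r3, r2, r1, s3, s2, s1)
  | c :: cs =>
    let p3 := fkP numKeypad c
    let m3 := movesF numKeypad r3 p3
    let z := loopA2 r2 r1 s2 s1 m3
    loopA3 p3 z.1 z.2.1 (s3 ++ m3) z.2.2.1 z.2.2.2 cs

def calc_moves (string : String) : String × String × String :=
  let r1 := (findKey dirKeypad "A").getD (0, 0)
  let r2 := (findKey dirKeypad "A").getD (0, 0)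
  let r3 := (findKey numKeypad "A").getD (0, 0)
  let z := loopA3 r3 r2 r1 [] [] [] string.toList
  (String.ofList z.2.2.2.1, String.ofList z.2.2.2.2.1, String.ofList z.2.2.2.2.2)

-- ===== PORT B =====
-- path(gap, start, end): move string with a closed-form gap-avoidance test instead of simulation
def pathB (gap s e : Int × Int) : List Char :=
  let lr : List Char :=
    if e.1 ≥ s.1 then List.replicate (e.1 - s.1).toNat '>'
    else List.replicate (s.1 - e.1).toNat '<'
  let ud : List Char :=
    if e.2 ≥ s.2 then List.replicate (e.2 - s.2).toNat 'v'
    else List.replicate (s.2 - e.2).toNat '^'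
  let lrOk : Bool := !((gap.2 == s.2 && gap.1 != s.1 && min s.1 e.1 ≤ gap.1 && gap.1 ≤ max s.1 e.1)
                      || (gap.1 == e.1 && min s.2 e.2 ≤ gap.2 && gap.2 ≤ max s.2 e.2))
  let udOk : Bool := !((gap.1 == s.1 && gap.2 != s.2 && min s.2 e.2 ≤ gap.2 && gap.2 ≤ max s.2 e.2)
                      || (gap.2 == e.2 && min s.1 e.1 ≤ gap.1 && gap.1 ≤ max s.1 e.1))
  if lr.contains '<' && lrOk then lr ++ ud ++ ['A']
  else if udOk then ud ++ lr ++ ['A']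
  else lr ++ ud ++ ['A']

-- cells = [(k,(x,y)) for y,row in enumerate(keypad) for x,k in enumerate(row)]
def cellsRow (row : List String) (y x : Int) : List (String × (Int × Int)) :=
  match row with
  | [] => []
  | k :: ks => (k, (x, y)) :: cellsRow ks y (x + 1)

def cellsAux (kp : List (List String)) (y : Int) : List (String × (Int × Int)) :=
  match kp with
  | [] => []
  | r :: rs => cellsRow r y 0 ++ cellsAux rs (y + 1)

-- build_table: dict {(a,b): path(gap, pa, pb)} over all key pairs of the keypad
def tableOf (kp : List (List String)) : PySem.Dict (String × String) (List Char) :=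
  let cells := cellsAux kp 0
  -- next(p for k,p in cells if k == ''); both keypads have a gap, so the default is never used
  let gap := ((cells.find? (fun kc => kc.1 == "")).getD ("", (0, 0))).2
  let keys := cells.filter (fun kc => kc.1 != "")
  PySem.Dict.ofList
    (keys.flatMap (fun a => keys.map (fun b => ((a.1, b.1), pathB gap a.2 b.2))))

-- expand: join of table[(prev, cur)] over consecutive pairs (zip('A'+seq, seq)); a missing key is
-- a KeyError in Python (excluded by Pre_), so the [] default is never the decisive value there
def expandT (tbl : PySem.Dict (String × String) (List Char)) (prev : Char) : List Char → List Char
  | [] => []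
  | c :: cs =>
    (PySem.Dict.get? tbl (String.singleton prev, String.singleton c)).getD [] ++ expandT tbl c cs

def calc_moves_alt (string : String) : String × String × String :=
  let numTable := tableOf numKeypad
  let dirTable := tableOf dirKeypad
  let m3 := expandT numTable 'A' string.toList
  let m2 := expandT dirTable 'A' m3
  let m1 := expandT dirTable 'A' m2
  (String.ofList m3, String.ofList m2, String.ofList m1)

-- ===== PRECONDITION & SPEC =====
-- Pre_ excludes strings containing a character not on the numeric keypad: there find_key returns
-- None and Python A raises TypeError (B raises KeyError the same way).
def Pre_calc_moves (string : String) : Prop :=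
  string.toList.all (fun c => "0123456789A".toList.contains c) = true
instance (string : String) : Decidable (Pre_calc_moves string) := by
  unfold Pre_calc_moves; infer_instance

def pvWitness_calc_moves : String := "029A"

def Spec_calc_moves (string : String) (out : String × String × String) : Prop := out = calc_moves_alt string
instance (string : String) (out : String × String × String) : Decidable (Spec_calc_moves string out) := by unfold Spec_calc_moves; infer_instance

-- ===== CLAIM =====
def Claim_equal_calc_moves : Prop := ∀ (string : String), Dom_calc_moves string → Pre_calc_moves string → Spec_calc_moves string (calc_moves string)

-- ===== LEMMAS AND PROOFS =====

-- proof-side model of one layer of A's loops, without the accumulator: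
-- final position and the emitted move string
def E (kp : List (List String)) (pos : Int × Int) : List Char → (Int × Int) × List Char
  | [] => (pos, [])
  | c :: cs =>
    let p := fkP kp c
    let z := E kp p cs
    (z.1, movesF kp pos p ++ z.2)

def numChars : List Char := "0123456789A".toList
def dirChars : List Char := "^v<>A".toList

theorem E_append (xs ys : List Char) (kp : List (List String)) (pos : Int × Int) :
    E kp pos (xs ++ ys) =
      ((E kp (E kp pos xs).1 ys).1, (E kp pos xs).2 ++ (E kp (E kp pos xs).1 ys).2) := by
  induction xs generalizing pos with
  | nil => simp [E]
  | cons c cs ih =>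
    simp only [List.cons_append, E]
    rw [ih]
    simp [List.append_assoc]

theorem loopA1_eq (cs : List Char) (r1 : Int × Int) (s1 : List Char) :
    loopA1 r1 s1 cs = ((E dirKeypad r1 cs).1, s1 ++ (E dirKeypad r1 cs).2) := by
  induction cs generalizing r1 s1 with
  | nil => simp [loopA1, E]
  | cons c cs ih =>
    simp only [loopA1, E]
    rw [ih]
    simp

theorem loopA2_eq (cs : List Char) (r2 r1 : Int × Int) (s2 s1 : List Char) :
    loopA2 r2 r1 s2 s1 cs =
      ((E dirKeypad r2 cs).1,
       (E dirKeypad r1 (E dirKeypad r2 cs).2).1,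
       s2 ++ (E dirKeypad r2 cs).2,
       s1 ++ (E dirKeypad r1 (E dirKeypad r2 cs).2).2) := by
  induction cs generalizing r2 r1 s2 s1 with
  | nil => simp [loopA2, E]
  | cons c cs ih =>
    simp only [loopA2, loopA1_eq]
    rw [ih]
    simp only [E]
    rw [E_append]
    simp [List.append_assoc]

theorem loopA3_eq (cs : List Char) (r3 r2 r1 : Int × Int) (s3 s2 s1 : List Char) :
    loopA3 r3 r2 r1 s3 s2 s1 cs =
      ((E numKeypad r3 cs).1,
       (E dirKeypad r2 (E numKeypad r3 cs).2).1,
       (E dirKeypad r1 (E dirKeypad r2 (E numKeypad r3 cs).2).2).1,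
       s3 ++ (E numKeypad r3 cs).2,
       s2 ++ (E dirKeypad r2 (E numKeypad r3 cs).2).2,
       s1 ++ (E dirKeypad r1 (E dirKeypad r2 (E numKeypad r3 cs).2).2).2) := by
  induction cs generalizing r3 r2 r1 s3 s2 s1 with
  | nil => simp [loopA3, E]
  | cons c cs ih =>
    simp only [loopA3]
    rw [loopA2_eq, ih]
    simp only [E]
    rw [E_append, E_append]
    simp [List.append_assoc]

-- B's table lookup agrees with A's moves() at the keys' positions (finite checks, Bool form)
set_option maxRecDepth 4000 in
theorem table_num_bool : (numChars.all fun a => numChars.all fun b =>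
    (PySem.Dict.get? (tableOf numKeypad) (String.singleton a, String.singleton b)).getD []
      == movesF numKeypad (fkP numKeypad a) (fkP numKeypad b)) = true := by decide

set_option maxRecDepth 4000 in
theorem table_dir_bool : (dirChars.all fun a => dirChars.all fun b =>
    (PySem.Dict.get? (tableOf dirKeypad) (String.singleton a, String.singleton b)).getD []
      == movesF dirKeypad (fkP dirKeypad a) (fkP dirKeypad b)) = true := by decide

theorem table_num : ∀ a ∈ numChars, ∀ b ∈ numChars,
    (PySem.Dict.get? (tableOf numKeypad) (String.singleton a, String.singleton b)).getD []
      = movesF numKeypad (fkP numKeypad a) (fkP numKeypad b) := by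
  intro a ha b hb
  exact eq_of_beq (List.all_eq_true.mp (List.all_eq_true.mp table_num_bool a ha) b hb)

theorem table_dir : ∀ a ∈ dirChars, ∀ b ∈ dirChars,
    (PySem.Dict.get? (tableOf dirKeypad) (String.singleton a, String.singleton b)).getD []
      = movesF dirKeypad (fkP dirKeypad a) (fkP dirKeypad b) := by
  intro a ha b hb
  exact eq_of_beq (List.all_eq_true.mp (List.all_eq_true.mp table_dir_bool a ha) b hb)

-- every character moves() emits is a directional key (finite checks, Bool form)
set_option maxRecDepth 4000 in
theorem movesF_num_bool : (numChars.all fun a => numChars.all fun b =>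
    (movesF numKeypad (fkP numKeypad a) (fkP numKeypad b)).all fun c =>
      dirChars.contains c) = true := by decide

set_option maxRecDepth 4000 in
theorem movesF_dir_bool : (dirChars.all fun a => dirChars.all fun b =>
    (movesF dirKeypad (fkP dirKeypad a) (fkP dirKeypad b)).all fun c =>
      dirChars.contains c) = true := by decide

theorem movesF_num_chars : ∀ a ∈ numChars, ∀ b ∈ numChars,
    ∀ c ∈ movesF numKeypad (fkP numKeypad a) (fkP numKeypad b), c ∈ dirChars := by
  intro a ha b hb c hc
  have h := List.all_eq_true.mp (List.all_eq_true.mp (List.all_eq_true.mp movesF_num_bool a ha) b hb) c hc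
  simpa using h

theorem movesF_dir_chars : ∀ a ∈ dirChars, ∀ b ∈ dirChars,
    ∀ c ∈ movesF dirKeypad (fkP dirKeypad a) (fkP dirKeypad b), c ∈ dirChars := by
  intro a ha b hb c hc
  have h := List.all_eq_true.mp (List.all_eq_true.mp (List.all_eq_true.mp movesF_dir_bool a ha) b hb) c hc
  simpa using h

-- one layer of A's loop model equals one table-expansion pass of B (generic in the keypad)
theorem E_eq_expandT (kp : List (List String)) (tbl : PySem.Dict (String × String) (List Char))
    (chs : List Char)
    (hT : ∀ a ∈ chs, ∀ b ∈ chs,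
      (PySem.Dict.get? tbl (String.singleton a, String.singleton b)).getD []
        = movesF kp (fkP kp a) (fkP kp b))
    (cs : List Char) (prev : Char) (hp : prev ∈ chs) (hcs : ∀ c ∈ cs, c ∈ chs) :
    (E kp (fkP kp prev) cs).2 = expandT tbl prev cs := by
  induction cs generalizing prev with
  | nil => rfl
  | cons c cs ih =>
    have hc : c ∈ chs := hcs c List.mem_cons_self
    simp only [E, expandT]
    rw [hT prev hp c hc, ih c hc (fun x hx => hcs x (List.mem_cons_of_mem _ hx))]

-- the characters of one expansion pass are directional keys
theorem expandT_chars (kp : List (List String)) (tbl : PySem.Dict (String × String) (List Char))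
    (chs : List Char)
    (hT : ∀ a ∈ chs, ∀ b ∈ chs,
      (PySem.Dict.get? tbl (String.singleton a, String.singleton b)).getD []
        = movesF kp (fkP kp a) (fkP kp b))
    (hM : ∀ a ∈ chs, ∀ b ∈ chs, ∀ c ∈ movesF kp (fkP kp a) (fkP kp b), c ∈ dirChars)
    (cs : List Char) (prev : Char) (hp : prev ∈ chs) (hcs : ∀ c ∈ cs, c ∈ chs) :
    ∀ c ∈ expandT tbl prev cs, c ∈ dirChars := by
  induction cs generalizing prev with
  | nil => intro c hc; cases hc
  | cons c cs ih =>
    have hc : c ∈ chs := hcs c List.mem_cons_self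
    intro x hx
    simp only [expandT, List.mem_append] at hx
    rcases hx with hx | hx
    · rw [hT prev hp c hc] at hx
      exact hM prev hp c hc x hx
    · exact ih c hc (fun y hy => hcs y (List.mem_cons_of_mem _ hy)) x hx

-- ===== VERDICT =====
theorem calc_moves_spec : Claim_equal_calc_moves := by
  intro s _ hpre
  unfold Spec_calc_moves calc_moves calc_moves_alt
  dsimp only
  rw [loopA3_eq]
  have hA : 'A' ∈ numChars := by decide
  have hAd : 'A' ∈ dirChars := by decide
  have hsn : ∀ c ∈ s.toList, c ∈ numChars := by
    intro c hc
    have h := (List.all_eq_true.mp hpre) c hc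
    exact List.mem_of_elem_eq_true h
  have hstart_num : (findKey numKeypad "A").getD (0, 0) = fkP numKeypad 'A' := rfl
  have hstart_dir : (findKey dirKeypad "A").getD (0, 0) = fkP dirKeypad 'A' := rfl
  rw [hstart_num, hstart_dir]
  have h3 := E_eq_expandT numKeypad (tableOf numKeypad) numChars table_num s.toList 'A' hA hsn
  have hm3 : ∀ c ∈ expandT (tableOf numKeypad) 'A' s.toList, c ∈ dirChars :=
    expandT_chars numKeypad (tableOf numKeypad) numChars table_num movesF_num_chars s.toList 'A' hA hsn
  rw [h3]
  have h2 := E_eq_expandT dirKeypad (tableOf dirKeypad) dirChars table_dir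
    (expandT (tableOf numKeypad) 'A' s.toList) 'A' hAd hm3
  have hm2 : ∀ c ∈ expandT (tableOf dirKeypad) 'A' (expandT (tableOf numKeypad) 'A' s.toList), c ∈ dirChars :=
    expandT_chars dirKeypad (tableOf dirKeypad) dirChars table_dir movesF_dir_chars _ 'A' hAd hm3
  rw [h2]
  have h1 := E_eq_expandT dirKeypad (tableOf dirKeypad) dirChars table_dir
    (expandT (tableOf dirKeypad) 'A' (expandT (tableOf numKeypad) 'A' s.toList)) 'A' hAd hm2
  rw [h1]
  simp
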